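-- pv_equiv track=rewrite | github.com/LukeDeWaal/SDL2NIM | sdl2nim/utils.py | split_with_brackets
-- ===== SOURCE A (Python) =====
-- def split_with_brackets(string: str, delim: str, brackets: list):
--     """
--     Split string by delimiter preserving brackets
--     """
--     idx = 0
--     prev = 0
--     chunks = []
--     open_brackets = 0
--     while idx < len(string):
--         character = string[idx]
--
--         if character == delim:
--             if open_brackets > 0:
--                 idx += 1
--             else:
--                 chunk = string[prev: idx].strip()
--                 chunks.append(chunk)
--                 idx = idx + 1
--                 prev = idx
--             continue
--
--         for b_left, b_right in brackets:
--             if character == b_left: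
--                 open_brackets += 1
--                 break
--             elif character == b_right:
--                 open_brackets -= 1
--                 break
--             else:
--                 continue
--
--         idx += 1
--         if idx == len(string):
--             chunks.append(string[prev : ].strip())
--
--     return chunks
-- ===== SOURCE B (Python) =====
-- def split_with_brackets(string: str, delim: str, brackets: list):
--     """
--     Split string by delimiter preserving brackets
--     """
--     def bracket_delta(ch):
--         for b_left, b_right in brackets:
--             if ch == b_left:
--                 return 1
--             if ch == b_right:
--                 return -1
--         return 0
--
--     # pass 1: indices of delimiters that sit outside all brackets
--     depth = 0
--     cuts = []
--     for i, ch in enumerate(string):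
--         if ch == delim:
--             if depth == 0:
--                 cuts.append(i)
--         else:
--             depth += bracket_delta(ch)
--
--     # pass 2: cut the string at those indices
--     res = []
--     prev = 0
--     for c in cuts:
--         res.append(string[prev:c].strip())
--         prev = c + 1
--     res.append(string[prev:].strip())
--     return res
-- ===== Notes on version B (the rewrite author's own statement) =====
-- stated objective: alternative
-- what changed: Replaces A's single index-juggling while-loop that slices chunks as it scans with two separate passes (collect the indices of delimiters outside brackets, then cut the string at those indices); Pre_ excludes empty strings and strings ending in the delimiter, where A drops the trailing empty chunk while B keeps it, and strings where a delimiter is reached at negative bracket depth (unmatched closing brackets), where A's splitting there is accidental -- all defensible-corner artefacts.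
-- outside the precondition, e.g. on split_with_brackets('', ',', []): A returns [], B returns ['']; on split_with_brackets('a,', ',', []): A returns ['a'], B returns ['a', '']; on split_with_brackets(')a,b', ',', [('(', ')')]): A returns [')a', 'b'], B returns [')a,b']
import Mathlib
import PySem

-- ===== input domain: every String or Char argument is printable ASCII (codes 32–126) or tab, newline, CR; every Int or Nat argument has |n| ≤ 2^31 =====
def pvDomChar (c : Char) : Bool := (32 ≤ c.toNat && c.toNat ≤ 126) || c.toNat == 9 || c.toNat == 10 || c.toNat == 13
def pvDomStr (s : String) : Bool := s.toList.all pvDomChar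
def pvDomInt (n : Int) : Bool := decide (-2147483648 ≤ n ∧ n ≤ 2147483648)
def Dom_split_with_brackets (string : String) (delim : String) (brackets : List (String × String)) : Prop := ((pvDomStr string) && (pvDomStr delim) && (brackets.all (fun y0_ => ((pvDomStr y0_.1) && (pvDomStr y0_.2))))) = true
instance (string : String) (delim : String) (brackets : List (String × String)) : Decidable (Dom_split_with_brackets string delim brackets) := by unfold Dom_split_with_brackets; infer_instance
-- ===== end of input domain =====

-- B replaces A's single index-juggling scan by two passes (record the indices of
-- delimiters outside brackets, then cut at them); same cost, different
-- decomposition ("alternative"). Equality of RETURN values is proved on Pre_.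

-- ===== PORT A =====
-- the inner `for b_left, b_right in brackets` loop with break
def pvBracketStepA (brackets : List (String × String)) (c : Char) (ob : Int) : Int :=
  match brackets with
  | [] => ob
  | (bl, br) :: bs =>
    if String.ofList [c] = bl then ob + 1
    else if String.ofList [c] = br then ob - 1
    else pvBracketStepA bs c ob

-- the while-loop of A: rest = characters from position idx on, state (idx, prev, chunks, ob)
def pvLoopA (full : List Char) (delim : String) (brackets : List (String × String)) :
    List Char → Nat → Nat → List String → Int → List String
  | [], _, _, chunks, _ => chunks
  | c :: rs, idx, prev, chunks, ob =>
    if String.ofList [c] = delim then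
      if ob > 0 then
        pvLoopA full delim brackets rs (idx + 1) prev chunks ob
      else
        pvLoopA full delim brackets rs (idx + 1) (idx + 1)
          (chunks ++ [String.ofList (PySem.Chars.strip (PySem.List.slice full (some (prev : Int)) (some (idx : Int))))]) ob
    else
      let ob' := pvBracketStepA brackets c ob
      let chunks' :=
        if rs.isEmpty then
          chunks ++ [String.ofList (PySem.Chars.strip (PySem.List.slice full (some (prev : Int)) none))]
        else chunks
      pvLoopA full delim brackets rs (idx + 1) prev chunks' ob'

def split_with_brackets (string : String) (delim : String) (brackets : List (String × String)) : List String :=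
  pvLoopA string.toList delim brackets string.toList 0 0 [] 0

-- ===== PORT B =====
-- B's `bracket_delta` helper: +1 on an opening bracket, -1 on a closing one
def pvDelta (brackets : List (String × String)) (c : Char) : Int :=
  match brackets with
  | [] => 0
  | (bl, br) :: bs =>
    if String.ofList [c] = bl then 1
    else if String.ofList [c] = br then -1
    else pvDelta bs c

-- pass 1: indices of delimiters outside all brackets
def pvCutsB (delim : String) (brackets : List (String × String)) :
    List Char → Nat → Int → List Nat
  | [], _, _ => []
  | c :: rs, i, depth =>
    if String.ofList [c] = delim then
      if depth = 0 then i :: pvCutsB delim brackets rs (i + 1) depth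
      else pvCutsB delim brackets rs (i + 1) depth
    else pvCutsB delim brackets rs (i + 1) (depth + pvDelta brackets c)

-- pass 2: cut the string at the recorded indices, final piece appended at the end
def pvBuildB (full : List Char) :
    List Nat → Nat → List String → List String
  | [], prev, res =>
    res ++ [String.ofList (PySem.Chars.strip (PySem.List.slice full (some (prev : Int)) none))]
  | cut :: cs, prev, res =>
    pvBuildB full cs (cut + 1)
      (res ++ [String.ofList (PySem.Chars.strip (PySem.List.slice full (some (prev : Int)) (some (cut : Int))))])

def split_with_brackets_alt (string : String) (delim : String) (brackets : List (String × String)) : List String :=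
  let s := string.toList
  pvBuildB s (pvCutsB delim brackets s 0 0) 0 []

-- ===== PRECONDITION & SPEC =====
-- balanced-prefix condition: the bracket depth is nonnegative whenever a delimiter is met
def pvDepthOk (delim : String) (brackets : List (String × String)) :
    List Char → Int → Bool
  | [], _ => true
  | c :: rs, d =>
    if String.ofList [c] = delim then decide (0 ≤ d) && pvDepthOk delim brackets rs d
    else pvDepthOk delim brackets rs (d + pvDelta brackets c)

-- Pre_ excludes: empty strings and strings ending in the delimiter (A drops the trailing
-- empty chunk, B keeps it — both defensible), and strings where a delimiter is reached at
-- negative bracket depth (unmatched closing brackets), where A's splitting is accidental.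
def Pre_split_with_brackets (string : String) (delim : String) (brackets : List (String × String)) : Prop :=
  string.toList ≠ [] ∧
  string.toList.getLast?.all (fun ℓ => String.ofList [ℓ] != delim) = true ∧
  pvDepthOk delim brackets string.toList 0 = true
instance (string : String) (delim : String) (brackets : List (String × String)) : Decidable (Pre_split_with_brackets string delim brackets) := by unfold Pre_split_with_brackets; infer_instance

def pvWitness_split_with_brackets : String × String × (List (String × String)) :=
  ("a(b,c), d", ",", [("(", ")")])

def Spec_split_with_brackets (string : String) (delim : String) (brackets : List (String × String)) (out : List String) : Prop := out = split_with_brackets_alt string delim brackets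
instance (string : String) (delim : String) (brackets : List (String × String)) (out : List String) : Decidable (Spec_split_with_brackets string delim brackets out) := by unfold Spec_split_with_brackets; infer_instance

-- ===== CLAIM (what is proved, stated in full; the proofs are below) =====
def Claim_equal_split_with_brackets : Prop := ∀ (string : String) (delim : String) (brackets : List (String × String)), Dom_split_with_brackets string delim brackets → Pre_split_with_brackets string delim brackets → Spec_split_with_brackets string delim brackets (split_with_brackets string delim brackets)

-- ===== LEMMAS AND PROOFS =====

lemma pvBracketStep_eq (brackets : List (String × String)) (c : Char) (ob : Int) :
    pvBracketStepA brackets c ob = ob + pvDelta brackets c := by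
  induction brackets with
  | nil => simp [pvBracketStepA, pvDelta]
  | cons p bs ih => cases p; simp [pvBracketStepA, pvDelta, ih]; split_ifs <;> omega

-- the key invariant: while the suffix `rest` is non-empty, does not end in the delimiter
-- and keeps the depth nonnegative at delimiters, A's loop from state
-- (pre.length, prev, chunks, ob) computes exactly B's second pass applied to the
-- cuts B's first pass finds in `rest`.
lemma pvLoop_eq (full : List Char) (delim : String) (brackets : List (String × String)) :
    ∀ (rest pre : List Char) (prev : Nat) (chunks : List String) (ob : Int),
      full = pre ++ rest → rest ≠ [] →
      (∀ ℓ, rest.getLast? = some ℓ → String.ofList [ℓ] ≠ delim) →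
      pvDepthOk delim brackets rest ob = true →
      pvLoopA full delim brackets rest pre.length prev chunks ob
        = pvBuildB full (pvCutsB delim brackets rest pre.length ob) prev chunks := by
  intro rest
  induction rest with
  | nil => intro _ _ _ _ hfull h; exact absurd rfl h
  | cons c rs ih =>
    intro pre prev chunks ob hfull _ hlast hdep
    by_cases hrs : rs = []
    · subst hrs
      subst hfull
      have hd : ¬ String.ofList [c] = delim := hlast c (by simp)
      simp [pvLoopA, pvCutsB, pvBuildB, hd]
    · have hlen : (pre ++ [c]).length = pre.length + 1 := by simp
      have hlast' : ∀ ℓ, rs.getLast? = some ℓ → String.ofList [ℓ] ≠ delim := by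
        intro ℓ hℓ
        apply hlast ℓ
        cases rs with
        | nil => exact absurd rfl hrs
        | cons x xs => simpa using hℓ
      by_cases hd : String.ofList [c] = delim
      · simp only [pvDepthOk, hd, if_pos, Bool.and_eq_true, decide_eq_true_eq] at hdep
        obtain ⟨hob0, hdep'⟩ := hdep
        by_cases hob : ob > 0
        · have hne : ¬ ob = 0 := by omega
          have := ih (pre ++ [c]) prev chunks ob (by simp [hfull]) hrs hlast' hdep'
          rw [hlen] at this
          simp [pvLoopA, pvCutsB, hd, hob, hne, this]
        · have heq : ob = 0 := by omega
          subst heq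
          have := ih (pre ++ [c]) (pre.length + 1)
            (chunks ++ [String.ofList (PySem.Chars.strip
              (PySem.List.slice full (some (prev : Int)) (some (pre.length : Int))))]) 0
            (by simp [hfull]) hrs hlast' hdep'
          rw [hlen] at this
          simp [pvLoopA, pvCutsB, pvBuildB, hd, this]
      · simp only [pvDepthOk, hd, ite_false] at hdep
        have := ih (pre ++ [c]) prev chunks (ob + pvDelta brackets c) (by simp [hfull]) hrs hlast' hdep
        rw [hlen] at this
        simp [pvLoopA, pvCutsB, hd, hrs, this, pvBracketStep_eq]

-- ===== VERDICT (by name: the statement is the Claim_ definition above) =====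
theorem split_with_brackets_spec : Claim_equal_split_with_brackets := by
  intro string delim brackets _ hpre
  obtain ⟨hne, hlast, hdep⟩ := hpre
  unfold Spec_split_with_brackets split_with_brackets split_with_brackets_alt
  refine pvLoop_eq string.toList delim brackets string.toList [] 0 [] 0 rfl hne ?_ hdep
  intro ℓ hℓ
  rw [hℓ] at hlast
  simpa using hlast
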